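-- pv_equiv track=rewrite | github.com/rcpsilva/PCC104_DesignAndAnalysisOfAlgorithms | 2023-2/Exams (pt-BR)/PCC104-GulosoBacktracking/rec3.py | algorithm
-- ===== SOURCE A (Python) =====
-- def algorithm(n):
--     if n <= 1:
--         return n
--     else:
--         a = 0
--         for i in range(n):
--             a += i
--
--         return a + algorithm(n // 2)
-- ===== SOURCE B (Python) =====
-- def algorithm(n):
--     total = 0
--     while n > 1:
--         total += n * (n - 1) // 2
--         n //= 2
--     return total + n
-- ===== Notes on version B (the rewrite author's own statement) =====
-- stated objective: faster
-- what changed: Replaces A's recursion with a linear summation loop at each level by a single iterative while-loop over the halving chain that adds the Gauss closed-form triangular number per level into an accumulator.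
import Mathlib
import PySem

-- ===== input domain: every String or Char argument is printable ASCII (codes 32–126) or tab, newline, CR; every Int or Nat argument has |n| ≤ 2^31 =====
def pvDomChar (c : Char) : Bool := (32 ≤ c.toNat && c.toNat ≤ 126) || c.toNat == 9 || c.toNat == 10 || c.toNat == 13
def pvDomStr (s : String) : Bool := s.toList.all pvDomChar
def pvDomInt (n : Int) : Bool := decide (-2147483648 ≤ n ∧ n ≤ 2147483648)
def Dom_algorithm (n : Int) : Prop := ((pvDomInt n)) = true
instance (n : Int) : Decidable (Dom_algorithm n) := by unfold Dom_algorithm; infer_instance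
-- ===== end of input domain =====

-- B is an iterative while-loop over the halving chain, adding the Gauss closed-form triangular number
-- per level into an accumulator, instead of A's recursion with an O(n) summation loop (objective: faster).

-- ===== PORT A =====
def algorithm (n : Int) : Int :=
  if n ≤ 1 then n
  else
    ((PySem.List.pyRange 0 n 1).foldl (fun a i => a + i) 0) + algorithm (PySem.Int.floordiv n 2)
termination_by n.toNat
decreasing_by
  simp only [PySem.Int.floordiv]
  simp only [Int.fdiv_eq_ediv]; norm_num
  omega

-- ===== PORT B =====
-- the 'while n > 1' loop of Source B, state = (n, total)
def algorithmLoop (n total : Int) : Int :=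
  if 1 < n then
    algorithmLoop (PySem.Int.floordiv n 2) (total + PySem.Int.floordiv (n * (n - 1)) 2)
  else total + n
termination_by n.toNat
decreasing_by
  simp only [PySem.Int.floordiv]
  simp only [Int.fdiv_eq_ediv]; norm_num
  omega

def algorithm_alt (n : Int) : Int := algorithmLoop n 0

-- ===== PRECONDITION & SPEC =====
def Spec_algorithm (n : Int) (out : Int) : Prop := out = algorithm_alt n
instance (n : Int) (out : Int) : Decidable (Spec_algorithm n out) := by unfold Spec_algorithm; infer_instance

-- ===== CLAIM (what is proved, stated in full; the proofs are below) =====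
def Claim_equal_algorithm : Prop := ∀ (n : Int), Dom_algorithm n → Spec_algorithm n (algorithm n)

-- ===== LEMMAS AND PROOFS =====

-- Gauss: A's summation loop over range(m) equals m*(m-1) floordiv 2.
theorem pv_sum_range (m : Nat) :
    ((PySem.List.pyRange 0 (m : Int) 1).foldl (fun a i => a + i) 0)
      = PySem.Int.floordiv ((m : Int) * ((m : Int) - 1)) 2 := by
  induction m with
  | zero => simp [PySem.List.pyRange_one_eq_nil, PySem.Int.floordiv]
  | succ k ih =>
    have h : ((k : Int) + 1) = ((k + 1 : Nat) : Int) := by push_cast; ring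
    have hsplit := PySem.List.pyRange_one_succ_right (a := 0) (b := (k : Int)) (by positivity)
    rw [← h, hsplit, List.foldl_append]
    simp only [List.foldl_cons, List.foldl_nil]
    rw [ih]
    simp only [PySem.Int.floordiv]
    simp only [Int.fdiv_eq_ediv]; norm_num
    have hnl : ((k : Int) + 1) * (k : Int) = (k : Int) * ((k : Int) - 1) + 2 * (k : Int) := by ring
    omega

-- Loop invariant: the accumulator distributes out of B's loop.
theorem pv_loop_inv (n total : Int) : algorithmLoop n total = total + algorithm n := by
  induction hm : n.toNat using Nat.strong_induction_on generalizing n total with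
  | _ m ih =>
    rw [algorithmLoop, algorithm]
    by_cases h : n ≤ 1
    · rw [if_neg (by omega), if_pos h]
    · rw [if_pos (by omega), if_neg h]
      have hrec := ih (PySem.Int.floordiv n 2).toNat
        (by simp only [PySem.Int.floordiv, Int.fdiv_eq_ediv]; omega)
        (PySem.Int.floordiv n 2) (total + PySem.Int.floordiv (n * (n - 1)) 2) rfl
      rw [hrec]
      obtain ⟨k, hk⟩ : ∃ k : Nat, n = (k : Int) := ⟨n.toNat, by omega⟩
      rw [hk, pv_sum_range]
      ring

-- ===== VERDICT (by name: the statement is the Claim_ definition above) =====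
theorem algorithm_spec : Claim_equal_algorithm := by
  intro n _
  unfold Spec_algorithm algorithm_alt
  rw [pv_loop_inv]
  ring
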